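-- pv_equiv track=rewrite | github.com/daniel-reich/ubiquitous-fiesta | vC4P2jGR6wxED7MBL_5.py | larger_than_right
-- ===== SOURCE A (Python) =====
-- def larger_than_right(lst):
--   i=0
--   a=[]
--   while i<len(lst)-1:
--    if lst[i]>max(lst[i+1:]) : a.append(lst[i])
--    i+=1
--   a.append(lst[-1])
--   return a
-- ===== SOURCE B (Python) =====
-- def larger_than_right(lst):
--   m = lst[-1]
--   out = [m]
--   for x in reversed(lst[:-1]):
--     if x > m:
--       out.append(x)
--       m = x
--   out.reverse()
--   return out
-- ===== Notes on version B (the rewrite author's own statement) =====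
-- stated objective: faster
-- what changed: Replaced the O(n^2) per-index recomputation of max(lst[i+1:]) by a single right-to-left pass maintaining a running maximum (the classic 'leaders in array' algorithm), building the result backwards and reversing once.
import Mathlib
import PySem

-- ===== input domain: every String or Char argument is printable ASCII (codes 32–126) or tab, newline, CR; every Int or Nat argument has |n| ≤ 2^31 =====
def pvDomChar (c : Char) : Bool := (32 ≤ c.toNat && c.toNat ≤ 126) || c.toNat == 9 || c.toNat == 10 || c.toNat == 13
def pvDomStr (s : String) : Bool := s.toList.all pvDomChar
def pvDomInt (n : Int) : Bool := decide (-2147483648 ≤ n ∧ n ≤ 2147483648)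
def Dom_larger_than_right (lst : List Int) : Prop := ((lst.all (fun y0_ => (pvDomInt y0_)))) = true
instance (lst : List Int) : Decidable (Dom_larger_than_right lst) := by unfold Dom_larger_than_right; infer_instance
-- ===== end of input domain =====

-- B replaces A's quadratic per-index recomputation of max(lst[i+1:]) by one
-- right-to-left pass with a running maximum (objective: faster, O(n) vs O(n^2)).

-- ===== PORT A =====
-- A's while loop is 'for i in range(len(lst)-1)'; the .getD 0 defaults model
-- lst[i] and max(lst[i+1:]) which never fail for i in that range.
def larger_than_right (lst : List Int) : List Int :=
  let a := (List.range (lst.length - 1)).foldl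
    (fun (a : List Int) (i : Nat) =>
      if (PySem.List.pyGet? lst (i : Int)).getD 0 >
         ((PySem.List.max? (PySem.List.slice lst (some ((i : Int) + 1)) none)
            (fun y => y)).getD 0)
      then a ++ [(PySem.List.pyGet? lst (i : Int)).getD 0] else a) []
  match PySem.List.pyGet? lst (-1) with
  | some last => a ++ [last]
  | none => a  -- Python raises IndexError here (lst = []); excluded by Pre_

-- ===== PORT B =====
def larger_than_right_alt (lst : List Int) : List Int :=
  match PySem.List.pyGet? lst (-1) with
  | none => []  -- Python raises IndexError here (lst = []); excluded by Pre_
  | some m0 =>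
    let p := ((PySem.List.slice lst none (some (-1))).reverse).foldl
      (fun (p : List Int × Int) x => if x > p.2 then (p.1 ++ [x], x) else p)
      ([m0], m0)
    p.1.reverse

-- ===== PRECONDITION & SPEC =====
-- Pre_ excludes exactly the empty list, on which A raises IndexError when reading the last element.
def Pre_larger_than_right (lst : List Int) : Prop := lst ≠ []
instance (lst : List Int) : Decidable (Pre_larger_than_right lst) := by
  unfold Pre_larger_than_right; infer_instance

def pvWitness_larger_than_right : List Int := [1, 3, 2]

def Spec_larger_than_right (lst : List Int) (out : List Int) : Prop := out = larger_than_right_alt lst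
instance (lst : List Int) (out : List Int) : Decidable (Spec_larger_than_right lst out) := by unfold Spec_larger_than_right; infer_instance

-- ===== CLAIM (what is proved, stated in full; the proofs are below) =====
def Claim_equal_larger_than_right : Prop := ∀ (lst : List Int), Dom_larger_than_right lst → Pre_larger_than_right lst → Spec_larger_than_right lst (larger_than_right lst)

-- ===== LEMMAS AND PROOFS =====

-- Reference "leaders" function both ports are reduced to.
def lead : List Int → List Int
  | [] => []
  | [x] => [x]
  | x :: y :: t =>
    (if x > (t.foldl max y) then [x] else []) ++ lead (y :: t)

theorem foldl_max_init (t : List Int) : ∀ (x y : Int),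
    t.foldl max (max x y) = max x (t.foldl max y) := by
  induction t with
  | nil => intro x y; simp [List.foldl]
  | cons z t ih =>
      intro x y
      simp only [List.foldl]
      rw [max_assoc, ih]

-- the step of A's fold, as a conditional chunk
def aChunk (lst : List Int) (i : Nat) : List Int :=
  if (PySem.List.pyGet? lst (i : Int)).getD 0 >
     ((PySem.List.max? (PySem.List.slice lst (some ((i : Int) + 1)) none)
        (fun y => y)).getD 0)
  then [(PySem.List.pyGet? lst (i : Int)).getD 0] else []

theorem aFold_eq_flat (lst : List Int) : ∀ (l : List Nat) (a : List Int),
    l.foldl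
      (fun (a : List Int) (i : Nat) =>
        if (PySem.List.pyGet? lst (i : Int)).getD 0 >
           ((PySem.List.max? (PySem.List.slice lst (some ((i : Int) + 1)) none)
              (fun y => y)).getD 0)
        then a ++ [(PySem.List.pyGet? lst (i : Int)).getD 0] else a) a
      = a ++ l.flatMap (aChunk lst) := by
  intro l
  induction l with
  | nil => intro a; simp
  | cons i l ih =>
      intro a
      simp only [List.foldl_cons, List.flatMap_cons]
      rw [ih]
      unfold aChunk
      split <;> simp

theorem aChunk_cons (x : Int) (t : List Int) (i : Nat) :
    aChunk (x :: t) (i + 1) = aChunk t i := by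
  unfold aChunk
  have e1 : ((i + 1 : Nat) : Int) + 1 = ((i + 2 : Nat) : Int) := by push_cast; ring
  have e2 : ((i : Nat) : Int) + 1 = ((i + 1 : Nat) : Int) := by push_cast; ring
  rw [e1, e2, PySem.List.slice_from_natCast, PySem.List.slice_from_natCast,
    PySem.List.pyGet?_natCast, PySem.List.pyGet?_natCast]
  simp [show i + 2 = i + 1 + 1 by omega, List.drop_succ_cons, List.getElem?_cons_succ]

theorem aChunk_zero (x y : Int) (t : List Int) :
    aChunk (x :: y :: t) 0 = (if x > (t.foldl max y) then [x] else []) := by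
  unfold aChunk
  have e : ((0 : Nat) : Int) + 1 = ((1 : Nat) : Int) := by norm_num
  rw [e, PySem.List.slice_from_natCast]
  simp [PySem.List.pyGet?_zero_cons, PySem.List.max?_id_cons]

theorem larger_eq_lead : ∀ (lst : List Int), lst ≠ [] →
    larger_than_right lst = lead lst := by
  intro lst
  induction lst with
  | nil => intro h; exact absurd rfl h
  | cons x t ih =>
      intro _
      cases t with
      | nil =>
          simp [larger_than_right, lead, PySem.List.pyGet?_neg_one]
      | cons y t' =>
          have hA : larger_than_right (x :: y :: t')
              = (List.range (y :: t').length).flatMap (aChunk (x :: y :: t'))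
                ++ [(y :: t').getLast (by simp)] := by
            unfold larger_than_right
            rw [aFold_eq_flat]
            rw [PySem.List.pyGet?_neg_one]
            simp [List.getLast?_eq_getLast]
          have hT : larger_than_right (y :: t')
              = (List.range ((y :: t').length - 1)).flatMap (aChunk (y :: t'))
                ++ [(y :: t').getLast (by simp)] := by
            unfold larger_than_right
            rw [aFold_eq_flat]
            rw [PySem.List.pyGet?_neg_one]
            simp [List.getLast?_eq_getLast]
          have hrange : List.range (y :: t').length
              = 0 :: (List.range ((y :: t').length - 1)).map (· + 1) := by
            simp [List.range_succ_eq_map]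
          rw [hA, hrange]
          simp only [List.flatMap_cons, List.flatMap_map]
          have hshift : ∀ i, aChunk (x :: y :: t') (i + 1) = aChunk (y :: t') i :=
            fun i => aChunk_cons x (y :: t') i
          have : (List.range ((y :: t').length - 1)).flatMap
                    (fun i => aChunk (x :: y :: t') (i + 1))
              = (List.range ((y :: t').length - 1)).flatMap (aChunk (y :: t')) := by
            apply List.flatMap_congr
            simp [hshift]
          rw [this, aChunk_zero]
          rw [show lead (x :: y :: t')
              = (if x > (t'.foldl max y) then [x] else []) ++ lead (y :: t') from rfl]
          rw [← ih (by simp), hT, List.append_assoc]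

-- invariant of B's right-to-left pass
theorem bFold_inv : ∀ (t : List Int) (x : Int),
    ((x :: t).dropLast.reverse).foldl
        (fun (p : List Int × Int) x => if x > p.2 then (p.1 ++ [x], x) else p)
        ([(x :: t).getLast (by simp)], (x :: t).getLast (by simp))
      = ((lead (x :: t)).reverse, t.foldl max x) := by
  intro t
  induction t with
  | nil => intro x; simp [lead]
  | cons y t' ih =>
      intro x
      have hdrop : (x :: y :: t').dropLast = x :: (y :: t').dropLast := by
        simp [List.dropLast]
      have hlast : (x :: y :: t').getLast (by simp) = (y :: t').getLast (by simp) := by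
        simp [List.getLast]
      rw [hdrop, hlast]
      simp only [List.reverse_cons, List.foldl_append, List.foldl_cons, List.foldl_nil]
      rw [ih y]
      rw [show lead (x :: y :: t')
          = (if x > (t'.foldl max y) then [x] else []) ++ lead (y :: t') from rfl]
      have hmax : t'.foldl max (max x y) = max x (t'.foldl max y) :=
        foldl_max_init t' x y
      by_cases hx : x > t'.foldl max y
      · rw [if_pos (by simpa using hx)]
        simp only [Prod.mk.injEq]
        exact ⟨by simp [hx], by rw [hmax]; omega⟩
      · rw [if_neg (by simpa using hx)]
        simp only [Prod.mk.injEq]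
        exact ⟨by simp [hx], by rw [hmax]; omega⟩

theorem alt_eq_lead : ∀ (lst : List Int), lst ≠ [] →
    larger_than_right_alt lst = lead lst := by
  intro lst hne
  cases lst with
  | nil => exact absurd rfl hne
  | cons x t =>
      unfold larger_than_right_alt
      rw [PySem.List.pyGet?_neg_one,
        List.getLast?_eq_some_getLast (l := x :: t) (by simp)]
      simp only [PySem.List.slice_to_neg_one]
      rw [bFold_inv t x]
      simp

-- ===== VERDICT (by name: the statement is the Claim_ definition above) =====
theorem larger_than_right_spec : Claim_equal_larger_than_right := by
  intro lst _ hpre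
  unfold Spec_larger_than_right
  rw [larger_eq_lead lst hpre, alt_eq_lead lst hpre]
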